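-- pv_equiv track=rewrite | github.com/Kim-Jaehyun0328/codingTest | programmers/level3/최고의 집합.py | solution
-- ===== SOURCE A (Python) =====
-- def solution(n, s):
--     if n > s:
--         return [-1]
--     p, q = divmod(s, n)
--     answer = [p for _ in range(n)]
--
--     for i in range(q):
--         answer[i] += 1
--     answer.sort()
--     return answer
-- ===== SOURCE B (Python) =====
-- def solution(n, s):
--     if n > s:
--         return [-1]
--     return [(s + i) // n for i in range(n)]
-- ===== Notes on version B (the rewrite author's own statement) =====
-- stated objective: simpler
-- what changed: Replaces A's divmod split, allocate-n-copies, in-place increment loop and final sort with a single comprehension computing each element independently by the closed form (s+i)//n, which is nondecreasing by construction; no quotient/remainder split, no mutation, no sort.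
import Mathlib
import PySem

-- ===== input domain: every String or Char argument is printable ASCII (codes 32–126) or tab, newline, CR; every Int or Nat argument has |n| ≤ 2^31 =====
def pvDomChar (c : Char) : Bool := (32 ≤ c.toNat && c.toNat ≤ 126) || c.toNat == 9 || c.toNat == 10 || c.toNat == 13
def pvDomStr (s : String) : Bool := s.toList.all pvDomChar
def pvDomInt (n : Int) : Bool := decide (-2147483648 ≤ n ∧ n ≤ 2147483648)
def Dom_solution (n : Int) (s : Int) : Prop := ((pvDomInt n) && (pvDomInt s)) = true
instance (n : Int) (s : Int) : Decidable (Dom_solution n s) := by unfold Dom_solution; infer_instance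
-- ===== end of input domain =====

-- B replaces A's divmod/allocate/increment-loop/sort with one pass computing each element by the closed form (s+i)//n (simpler; no sort, no mutation). 


-- ===== PORT A =====
def solution (n : Int) (s : Int) : List Int :=
  if n > s then [-1]
  else
    let p := PySem.Int.floordiv s n
    let q := PySem.Int.mod s n
    let answer := (PySem.List.pyRange 0 n 1).map (fun _ => p)
    let answer := (PySem.List.pyRange 0 q 1).foldl
      (fun acc i => PySem.List.pySetD acc i (PySem.List.pyGetD acc i 0 + 1)) answer
    PySem.List.sorted answer (fun x => x) false

-- ===== PORT B =====
def solution_alt (n : Int) (s : Int) : List Int :=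
  if n > s then [-1]
  else (PySem.List.pyRange 0 n 1).map (fun i => PySem.Int.floordiv (s + i) n)

-- ===== PRECONDITION & SPEC =====
-- Pre_ excludes exactly n = 0 with 0 ≤ s, where Python A raises ZeroDivisionError in divmod.
def Pre_solution (n : Int) (s : Int) : Prop := ¬ (n = 0 ∧ 0 ≤ s)
instance (n : Int) (s : Int) : Decidable (Pre_solution n s) := by unfold Pre_solution; infer_instance
def pvWitness_solution : Int × Int := (3, 10)

def Spec_solution (n : Int) (s : Int) (out : List Int) : Prop := out = solution_alt n s
instance (n : Int) (s : Int) (out : List Int) : Decidable (Spec_solution n s out) := by unfold Spec_solution; infer_instance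

-- ===== CLAIM (what is proved, stated in full; the proofs are below) =====
def Claim_equal_solution : Prop := ∀ (n : Int) (s : Int), Dom_solution n s → Pre_solution n s → Spec_solution n s (solution n s)

-- ===== LEMMAS AND PROOFS =====

-- setting position k (the head of the p-block) turns one p into p+1
lemma set_replicate_block (k m : Nat) (p v : Int) :
    (List.replicate k v ++ List.replicate (m + 1) p).set k v
      = List.replicate (k + 1) v ++ List.replicate m p := by
  rw [List.set_append_right _ _ (by simp)]
  simp only [List.length_replicate, Nat.sub_self, List.replicate_succ, List.set_cons_zero]
  rw [List.append_cons, ← List.replicate_succ', List.replicate_succ, List.cons_append]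

-- A's increment loop on a block of (k+m) copies of p yields k copies of (p+1) then m of p
lemma loop_replicate (k m : Nat) (p : Int) :
    (PySem.List.pyRange 0 (k : Int) 1).foldl
      (fun acc i => PySem.List.pySetD acc i (PySem.List.pyGetD acc i 0 + 1))
      (List.replicate (k + m) p)
      = List.replicate k (p + 1) ++ List.replicate m p := by
  induction k generalizing m with
  | zero => simp [PySem.List.pyRange_one_eq_nil]
  | succ k ih =>
    have hc : ((k + 1 : Nat) : Int) = (k : Int) + 1 := by push_cast; ring
    rw [hc, PySem.List.pyRange_one_succ_right (by positivity), List.foldl_append]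
    have h0 : k + 1 + m = k + (m + 1) := by omega
    rw [h0, ih]
    simp only [List.foldl_cons, List.foldl_nil, PySem.List.pyGetD_natCast,
      PySem.List.pySetD_natCast]
    have hg : (List.replicate k (p + 1) ++ List.replicate (m + 1) p).getD k 0 = p := by
      simp [List.getD_eq_getElem?_getD, List.replicate_succ]
    rw [hg, set_replicate_block]

-- B's per-index closed form is constant on each of the two half-open index blocks
lemma map_range_const {a b : Int} (f : Int → Int) (c : Int)
    (h : ∀ i, a ≤ i → i < b → f i = c) :
    (PySem.List.pyRange a b 1).map f = List.replicate (b - a).toNat c := by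
  have h1 : ∀ i ∈ PySem.List.pyRange a b 1, f i = (fun (_ : Int) => c) i := by
    intro i hi
    rw [PySem.List.mem_pyRange_one] at hi
    exact h i hi.1 hi.2
  rw [List.map_congr_left h1, List.map_const', PySem.List.length_pyRange_one]

-- ===== VERDICT (by name: the statement is the Claim_ definition above) =====
theorem solution_spec : Claim_equal_solution := by
  intro n s _ hpre
  unfold Spec_solution
  by_cases hgt : n > s
  · simp [solution, solution_alt, hgt]
  · simp only [solution, solution_alt, if_neg hgt]
    set p := PySem.Int.floordiv s n with hp
    set q := PySem.Int.mod s n with hq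
    rcases lt_trichotomy n 0 with hn | hn | hn
    · -- n < 0 : both sides are []
      have hqb := PySem.Int.mod_neg_bounds s hn
      rw [PySem.List.pyRange_one_eq_nil (le_of_lt hn)]
      rw [show PySem.List.pyRange 0 q 1 = [] from PySem.List.pyRange_one_eq_nil (by omega)]
      simp [PySem.List.sorted]
    · exact absurd (show n = 0 ∧ 0 ≤ s from ⟨hn, by omega⟩) hpre
    · -- n > 0
      have hq0 : 0 ≤ q := PySem.Int.mod_nonneg s hn
      have hqn : q < n := PySem.Int.mod_lt s hn
      have hs : p * n + q = s := by
        have := PySem.Int.floordiv_mul_add_mod s n; omega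
      set k := q.toNat with hk
      set m := (n - q).toNat with hm
      -- A's side
      have hrep : (PySem.List.pyRange 0 n 1).map (fun _ => p) = List.replicate (k + m) p := by
        rw [List.map_const']
        congr 1
        rw [PySem.List.length_pyRange_one]
        omega
      have hqk : q = (k : Int) := by omega
      rw [hrep, hqk, loop_replicate]
      -- B's side: split the range at n - q
      rw [PySem.List.pyRange_one_append 0 (n - q) n (by omega) (by omega), List.map_append]
      rw [map_range_const _ p (fun i h1 h2 => by
        rw [PySem.Int.floordiv_eq_iff_of_pos hn]
        constructor <;> nlinarith)]
      rw [map_range_const _ (p + 1) (fun i h1 h2 => by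
        rw [PySem.Int.floordiv_eq_iff_of_pos hn]
        constructor <;> nlinarith)]
      -- A's loop output sorts into those two blocks
      have hperm : (List.replicate m p ++ List.replicate k (p + 1)).Perm
          (List.replicate k (p + 1) ++ List.replicate m p) := List.perm_append_comm
      have hpair : (List.replicate m p ++ List.replicate k (p + 1)).Pairwise
          (fun a b => a ≤ b) := by
        rw [List.pairwise_append]
        refine ⟨List.pairwise_replicate.mpr (by simp), List.pairwise_replicate.mpr (by simp), ?_⟩
        intro x hx y hy
        rw [List.eq_of_mem_replicate hx, List.eq_of_mem_replicate hy]
        omega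
      rw [PySem.List.sorted_id_eq_of_perm_of_pairwise _ _ hperm hpair]
      have e1 : (n - q - 0).toNat = m := by omega
      have e2 : (n - (n - q)).toNat = k := by omega
      rw [e1, e2]
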